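-- pv_equiv track=rewrite | github.com/Sunnyeunice/Dice_game | crypto_helpers.py | in_engl_alpha
-- ===== SOURCE A (Python) =====
-- ALPHABET = 'abcdefghijklmnopqrstuvwxyz'
--
-- def in_engl_alpha(string):
--     """
--     (str) -> bool
--
--     returns True if the non-empty string contains only characters
--     from the English aphabet
--     otherwise, returns false
--
--     >>> in_engl_alpha("determine")
--     True
--     >>> in_engl_alpha("Ge")
--     True
--     >>> in_engl_alpha("cats and dogs")
--     False
--     >>> in_engl_alpha("my_list")
--     False
--
--     """
--     # first checks if the string is empty by comparing the length
--     if len(string) == 0: # if string == ""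
--         return False # ends here if the if statement is True
--     # for non-empty string, all English alphabet characters become lower case
--     string = string.lower()
--     for char in string:
--         #iterates through each character in the string
--         if char not in ALPHABET:
--             return False # stops the loop
--
--     return True # returns True for if all characters are in the alphabet
-- ===== SOURCE B (Python) =====
-- def in_engl_alpha(string):
--     # Closed-form: isalpha() is False for "" and True only for all-letter strings;
--     # isascii() restricts those letters to the English a-z/A-Z.
--     return string.isascii() and string.isalpha()
-- ===== Notes on version B (the rewrite author's own statement) =====
-- stated objective: idiomatic
-- what changed: Replaced the explicit length guard, whole-string lowercasing and char-by-char membership loop with one closed-form expression of two built-in whole-string predicates, isascii() and isalpha().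
import Mathlib
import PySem

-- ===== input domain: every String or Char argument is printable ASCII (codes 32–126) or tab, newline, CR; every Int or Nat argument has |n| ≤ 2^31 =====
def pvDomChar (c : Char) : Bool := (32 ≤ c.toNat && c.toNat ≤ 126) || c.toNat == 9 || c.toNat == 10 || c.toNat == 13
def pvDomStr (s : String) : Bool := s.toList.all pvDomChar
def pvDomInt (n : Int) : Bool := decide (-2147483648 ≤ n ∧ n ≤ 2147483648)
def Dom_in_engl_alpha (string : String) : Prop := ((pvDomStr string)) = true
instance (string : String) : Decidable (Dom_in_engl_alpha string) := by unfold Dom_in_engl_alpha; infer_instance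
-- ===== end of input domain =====

-- B replaces A's length guard + lowercasing + per-character membership loop by a
-- closed-form conjunction of two whole-string predicates (isascii ∧ isalpha); idiomatic, same cost.


-- ===== PORT A =====
def ALPHABET : String := "abcdefghijklmnopqrstuvwxyz"

-- the `for char in string: if char not in ALPHABET: return False` loop
def pvAlphaLoop : List Char → Bool
  | [] => true
  | c :: rest =>
      if !(PySem.Chars.isIn [c] ALPHABET.toList) then false else pvAlphaLoop rest

def in_engl_alpha (string : String) : Bool :=
  if PySem.Str.len string = 0 then false
  else pvAlphaLoop (PySem.Str.lower string).toList

-- ===== PORT B =====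
-- `string.isascii()` ported by hand (exact: every code point < 128), and `string.isalpha()`
def in_engl_alpha_alt (string : String) : Bool :=
  string.toList.all (fun c => c.toNat ≤ 127) && PySem.Str.strIsalpha string

-- ===== PRECONDITION & SPEC =====
def Spec_in_engl_alpha (string : String) (out : Bool) : Prop := out = in_engl_alpha_alt string
instance (string : String) (out : Bool) : Decidable (Spec_in_engl_alpha string out) := by unfold Spec_in_engl_alpha; infer_instance

-- ===== CLAIM (what is proved, stated in full; the proofs are below) =====
def Claim_equal_in_engl_alpha : Prop := ∀ (string : String), Dom_in_engl_alpha string → Spec_in_engl_alpha string (in_engl_alpha string)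

-- ===== LEMMAS AND PROOFS =====

theorem pvAlphaLoop_eq_all (l : List Char) :
    pvAlphaLoop l = l.all (fun c => PySem.Chars.isIn [c] ALPHABET.toList) := by
  induction l with
  | nil => rfl
  | cons c rest ih =>
      simp only [pvAlphaLoop, List.all_cons]
      by_cases h : PySem.Chars.isIn [c] ALPHABET.toList
      · simp [h, ih]
      · simp [Bool.not_eq_true] at h
        simp [h]

set_option maxRecDepth 10000 in
theorem pv_char_lemma_fin : ∀ n : Fin 128,
    PySem.Chars.isIn [PySem.Chars.lowerChar (Char.ofNat n.val)] ALPHABET.toList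
      = PySem.Chars.isalpha (Char.ofNat n.val) := by
  decide

theorem pv_char_lemma (c : Char) (h : c.toNat ≤ 127) :
    PySem.Chars.isIn [PySem.Chars.lowerChar c] ALPHABET.toList = PySem.Chars.isalpha c := by
  have := pv_char_lemma_fin ⟨c.toNat, by omega⟩
  simpa [Char.ofNat_toNat] using this

theorem pv_all_map (l : List Char) (h : ∀ c ∈ l, c.toNat ≤ 127) :
    (l.map PySem.Chars.lowerChar).all (fun c => PySem.Chars.isIn [c] ALPHABET.toList)
      = l.all PySem.Chars.isalpha := by
  induction l with
  | nil => rfl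
  | cons c rest ih =>
      simp only [List.map_cons, List.all_cons]
      rw [pv_char_lemma c (h c (List.mem_cons_self)), ih (fun d hd => h d (List.mem_cons_of_mem _ hd))]

-- ===== VERDICT (by name: the statement is the Claim_ definition above) =====
theorem in_engl_alpha_spec : Claim_equal_in_engl_alpha := by
  intro s hdom
  unfold Spec_in_engl_alpha in_engl_alpha in_engl_alpha_alt
  have hascii : ∀ c ∈ s.toList, c.toNat ≤ 127 := by
    intro c hc
    have := List.all_eq_true.mp hdom c hc
    simp [pvDomChar] at this
    omega
  have h1 : s.toList.all (fun c => c.toNat ≤ 127) = true := by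
    simp only [List.all_eq_true, decide_eq_true_eq]; exact hascii
  rw [h1, Bool.true_and]
  simp only [PySem.Str.strIsalpha]
  by_cases hz : PySem.Str.len s = 0
  · have : s.toList = [] := by
      have := hz
      simp [PySem.Str.len] at this
      simpa [List.length_eq_zero_iff] using this
    simp [PySem.Chars.strIsalpha, this]
  · have hne : s.toList ≠ [] := by
      intro h
      apply hz
      simp [PySem.Str.len, h]
    rw [if_neg hz]
    have hlow : (PySem.Str.lower s).toList = s.toList.map PySem.Chars.lowerChar := by
      simp [PySem.Str.toList_lower, PySem.Chars.lower]
    rw [hlow, pvAlphaLoop_eq_all]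
    simp only [PySem.Chars.strIsalpha, List.isEmpty_eq_false_iff.mpr hne, Bool.not_false,
      Bool.true_and]
    exact pv_all_map s.toList hascii
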